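-- pv_equiv track=rewrite | github.com/UrijVig/PythonProgram | PythonSeminar/SeminarTask/Seminar05/Stask02.py | rework_list_app1
-- ===== SOURCE A (Python) =====
-- def rework_list_app1(lst):
--     flag = True
--     for i in range(len(lst)):
--         if lst[i] == 5:
--             lst[i] = 1
--             flag = False
--     if flag:
--         return None
--     return lst
-- ===== SOURCE B (Python) =====
-- def rework_list_app1(lst):
--     if 5 not in lst:
--         return None
--     lst[:] = [1 if x == 5 else x for x in lst]
--     return lst
-- ===== Notes on version B (the rewrite author's own statement) =====
-- stated objective: simpler
-- what changed: Replaces the single flag-tracking loop with a membership early-exit followed by a comprehension that rebuilds the list in place; no flag state is kept.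
import Mathlib
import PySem

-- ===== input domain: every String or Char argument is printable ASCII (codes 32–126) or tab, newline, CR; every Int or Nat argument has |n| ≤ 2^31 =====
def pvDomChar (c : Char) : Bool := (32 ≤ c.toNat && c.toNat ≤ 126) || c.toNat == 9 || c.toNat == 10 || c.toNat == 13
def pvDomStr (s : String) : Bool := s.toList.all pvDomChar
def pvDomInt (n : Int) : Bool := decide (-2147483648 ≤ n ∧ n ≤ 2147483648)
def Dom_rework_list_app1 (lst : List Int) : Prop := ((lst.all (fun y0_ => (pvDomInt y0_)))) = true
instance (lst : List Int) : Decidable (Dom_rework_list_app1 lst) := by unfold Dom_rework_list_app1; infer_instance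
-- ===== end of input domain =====

-- ===== PORT A =====
-- B: detect 5 by membership, then rebuild with a map; simpler than A's flag loop.
-- Python A and B both mutate the argument list in place; equivalence here is about the return value.
-- A's index loop mutating lst[i] and flag, as structural recursion over the list carrying the flag
def reworkLoopA : List Int → Bool → (List Int × Bool)
  | [], flag => ([], flag)
  | x :: xs, flag =>
    if x = 5 then
      let r := reworkLoopA xs false
      (1 :: r.1, r.2)
    else
      let r := reworkLoopA xs flag
      (x :: r.1, r.2)

def rework_list_app1 (lst : List Int) : Option (List Int) :=
  let r := reworkLoopA lst true
  if r.2 then none else some r.1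

-- ===== PORT B =====
def rework_list_app1_alt (lst : List Int) : Option (List Int) :=
  if (5 : Int) ∈ lst then some (lst.map fun x => if x = 5 then 1 else x) else none

-- ===== PRECONDITION & SPEC =====
def Spec_rework_list_app1 (lst : List Int) (out : Option (List Int)) : Prop := out = rework_list_app1_alt lst
instance (lst : List Int) (out : Option (List Int)) : Decidable (Spec_rework_list_app1 lst out) := by unfold Spec_rework_list_app1; infer_instance

-- ===== CLAIM (what is proved, stated in full; the proofs are below) =====
def Claim_equal_rework_list_app1 : Prop := ∀ (lst : List Int), Dom_rework_list_app1 lst → Spec_rework_list_app1 lst (rework_list_app1 lst)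

-- ===== LEMMAS AND PROOFS =====

-- ===== VERDICT (by name: the statement is the Claim_ definition above) =====
lemma reworkLoopA_eq (lst : List Int) (flag : Bool) :
    reworkLoopA lst flag = (lst.map (fun x => if x = 5 then 1 else x), flag && !(decide ((5:Int) ∈ lst))) := by
  induction lst generalizing flag with
  | nil => simp [reworkLoopA]
  | cons x xs ih =>
    by_cases h : x = (5:Int) <;> simp [reworkLoopA, h, ih, eq_comm]

theorem rework_list_app1_spec : Claim_equal_rework_list_app1 := by
  intro lst _
  unfold Spec_rework_list_app1 rework_list_app1 rework_list_app1_alt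
  rw [reworkLoopA_eq]
  by_cases h : (5:Int) ∈ lst <;> simp [h]
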